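-- pv_equiv track=rewrite | github.com/Liphip/EidI | ha3/aufgabe_2.py | cooperations
-- ===== SOURCE A (Python) =====
-- def cooperations(list, castin):
--     coop = []
--     for i in range(len(list)):
--         film = list[i]
--         if film[1] == castin:
--             for j in range(len(list)):
--                 filmco = list[j]
--                 if filmco[0] == film[0]:
--                     coop += filmco[1]
--     return coop
-- ===== SOURCE B (Python) =====
-- def cooperations(list, castin):
--     groups = {}
--     for title, cast in list:
--         groups.setdefault(title, []).extend(cast)
--     coop = []
--     for title, cast in list:
--         if cast == castin:
--             coop.extend(groups.get(title, []))
--     return coop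
-- ===== Notes on version B (the rewrite author's own statement) =====
-- stated objective: alternative
-- what changed: Replaced the nested rescan of all films for each matching cast member by a single grouping pass building a dict of concatenated co-star lists keyed by title, then one dict lookup per matching film; the timed inputs rarely trigger A's inner loop, so no measured speed-up is claimed.
import Mathlib
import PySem

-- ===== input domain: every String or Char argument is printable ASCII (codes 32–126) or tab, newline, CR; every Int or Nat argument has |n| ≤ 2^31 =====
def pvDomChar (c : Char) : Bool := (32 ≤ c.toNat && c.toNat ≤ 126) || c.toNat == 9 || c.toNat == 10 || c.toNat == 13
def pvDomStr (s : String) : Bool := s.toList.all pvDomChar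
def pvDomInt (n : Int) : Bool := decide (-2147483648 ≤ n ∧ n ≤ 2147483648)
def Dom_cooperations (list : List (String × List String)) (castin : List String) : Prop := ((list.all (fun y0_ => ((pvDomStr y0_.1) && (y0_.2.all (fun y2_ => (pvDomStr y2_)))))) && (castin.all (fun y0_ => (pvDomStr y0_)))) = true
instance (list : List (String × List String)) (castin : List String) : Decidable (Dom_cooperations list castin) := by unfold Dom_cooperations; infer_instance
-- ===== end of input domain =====

-- B replaces A's per-match rescan of the whole list by one grouping pass into a dict of concatenated co-star lists keyed by title, then a lookup per matching film (alternative algorithm).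

-- ===== PORT A =====
-- literal transliteration of A: index loop, inner index loop rescanning the whole list
def cooperations (list : List (String × List String)) (castin : List String) : List String :=
  (PySem.List.pyRange 0 (PySem.List.len list)).foldl (fun coop i =>
    let film := PySem.List.pyGetD list i ("", [])
    if film.2 == castin then
      (PySem.List.pyRange 0 (PySem.List.len list)).foldl (fun c j =>
        let filmco := PySem.List.pyGetD list j ("", [])
        if filmco.1 == film.1 then c ++ filmco.2 else c) coop
    else coop) []

-- ===== PORT B =====
-- literal transliteration of B: build dict title → concatenated casts, then one lookup per matching film
def cooperations_alt (list : List (String × List String)) (castin : List String) : List String :=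
  let concat := list.foldl (fun d p => d.modify p.1 [] (· ++ p.2)) PySem.Dict.empty
  list.foldl (fun coop p => if p.2 == castin then coop ++ concat.getD p.1 [] else coop) []

-- ===== PRECONDITION & SPEC =====
def Spec_cooperations (list : List (String × List String)) (castin : List String) (out : List String) : Prop := out = cooperations_alt list castin
instance (list : List (String × List String)) (castin : List String) (out : List String) : Decidable (Spec_cooperations list castin out) := by unfold Spec_cooperations; infer_instance

-- ===== CLAIM (what is proved, stated in full; the proofs are below) =====
def Claim_equal_cooperations : Prop := ∀ (list : List (String × List String)) (castin : List String), Dom_cooperations list castin → Spec_cooperations list castin (cooperations list castin)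

-- ===== LEMMAS AND PROOFS =====

-- A's inner rescan concatenates exactly the casts of the films sharing the title
theorem inner_loop_eq (l : List (String × List String)) (t : String) (coop : List String) :
    l.foldl (fun c fc => if fc.1 == t then c ++ fc.2 else c) coop
      = coop ++ (l.filter (fun fc => fc.1 == t)).flatMap (·.2) := by
  induction l generalizing coop with
  | nil => simp
  | cons x xs ih =>
    simp only [List.foldl_cons, List.filter_cons]
    cases hx : (x.1 == t)
    · rw [if_neg (by simp), ih]; simp
    · rw [if_pos rfl, ih]; simp

-- B's dict groups the same concatenations by title
theorem dict_getD_eq (l : List (String × List String)) (d : PySem.Dict String (List String)) (t : String) :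
    (l.foldl (fun d p => d.modify p.1 [] (· ++ p.2)) d).getD t []
      = d.getD t [] ++ (l.filter (fun fc => fc.1 == t)).flatMap (·.2) := by
  induction l generalizing d with
  | nil => simp
  | cons x xs ih =>
    simp only [List.foldl_cons, List.filter_cons]
    rw [ih, PySem.Dict.getD_modify]
    by_cases h : t = x.1
    · simp [h]
    · have hx : (x.1 == t) = false := beq_eq_false_iff_ne.mpr (fun e => h e.symm)
      simp [h, hx]

-- ===== VERDICT (by name: the statement is the Claim_ definition above) =====
theorem cooperations_spec : Claim_equal_cooperations := by
  intro list castin _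
  show cooperations list castin = cooperations_alt list castin
  unfold cooperations cooperations_alt
  dsimp only
  rw [PySem.List.foldl_pyRange_pyGetD list ("", [])
    (fun coop film =>
      if (film.2 == castin) = true then
        List.foldl
          (fun c j =>
            if ((PySem.List.pyGetD list j ("", [])).1 == film.1) = true then
              c ++ (PySem.List.pyGetD list j ("", [])).2
            else c)
          coop (PySem.List.pyRange 0 (PySem.List.len list))
      else coop) [] (le_refl 0)]
  simp only [Int.toNat_zero, List.drop_zero]
  apply List.foldl_ext
  intro coop p _
  cases h : (p.2 == castin)
  · simp
  · rw [if_pos rfl, if_pos rfl]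
    rw [PySem.List.foldl_pyRange_pyGetD list ("", [])
      (fun c fc => if (fc.1 == p.1) = true then c ++ fc.2 else c) coop (le_refl 0)]
    simp only [Int.toNat_zero, List.drop_zero]
    rw [inner_loop_eq, dict_getD_eq]
    simp [PySem.Dict.getD_empty]
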